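-- pv_equiv track=rewrite | github.com/sainihimanshu1999/Data-Structures | June2021/BackTrack/LetterTilePossibility.py | numPossibilities
-- ===== SOURCE A (Python) =====
-- def numPossibilities(s):
--     result = set()
--
--     def dfs(path,string):
--         if path not in result:
--             if path:
--                 result.add(path)
--
--             for i in range(len(string)):
--                 dfs(path+string[i],string[:i]+string[i+1:])
--
--     dfs('',s)
--     return len(result)
-- ===== SOURCE B (Python) =====
-- def numPossibilities(s):
--     counts = {}
--     for ch in s:
--         counts[ch] = counts.get(ch, 0) + 1
--
--     def count(counts):
--         total = 0
--         for ch in counts: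
--             if counts[ch] > 0:
--                 counts[ch] -= 1
--                 total += 1 + count(counts)
--                 counts[ch] += 1
--         return total
--
--     return count(counts)
-- ===== Notes on version B (the rewrite author's own statement) =====
-- stated objective: alternative
-- what changed: A enumerates position-level DFS over string slices collecting every distinct sequence into a set and returns its size; B never materialises the sequences: it builds a character-frequency dict once and counts by backtracking over the distinct characters (decrement, recurse, restore), visiting each distinct sequence class once with O(alphabet) branching instead of O(remaining-length) branching plus string slicing and set hashing.
import Mathlib
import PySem

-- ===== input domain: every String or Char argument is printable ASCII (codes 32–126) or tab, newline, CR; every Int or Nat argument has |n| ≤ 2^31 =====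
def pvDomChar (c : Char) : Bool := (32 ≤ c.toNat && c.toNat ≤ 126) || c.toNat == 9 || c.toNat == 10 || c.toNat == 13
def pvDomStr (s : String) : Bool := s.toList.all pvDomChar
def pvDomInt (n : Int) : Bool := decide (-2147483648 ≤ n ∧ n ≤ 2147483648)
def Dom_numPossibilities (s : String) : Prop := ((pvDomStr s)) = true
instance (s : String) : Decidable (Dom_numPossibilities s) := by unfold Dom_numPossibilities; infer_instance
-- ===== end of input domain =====

-- B replaces A's set-of-strings DFS over string slices by a backtracking count over a
-- character-frequency dict (objective: alternative / constant-factor faster; same return value).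

-- ===== PORT A =====
-- dfs(path, string): mutating `result` is threaded as an explicit set parameter.
-- Python's `result` is a hash set; it is ported as Std.HashSet so that `path not in result`
-- is a hash lookup as in CPython — only membership, insert and len are used, on which a
-- hash set is exact (no iteration order is consumed).
-- The fuel argument only makes the recursion total: each recursive call shortens `string`
-- by one, so fuel = |s| + 1 is never exhausted.  string[i] with 0 ≤ i < len is List.getD.
def dfsA : Nat → List Char → List Char → Std.HashSet (List Char) → Std.HashSet (List Char)
  | 0, _, _, result => result
  | fuel + 1, path, string, result =>
    if path ∈ result then result
    else
      (List.range string.length).foldl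
        (fun r i => dfsA fuel (path ++ [string.getD i ' ']) (string.take i ++ string.drop (i + 1)) r)
        (if path ≠ [] then result.insert path else result)

def numPossibilities (s : String) : Int :=
  ((dfsA (s.toList.length + 1) [] s.toList ∅).size : Int)

-- ===== PORT B =====
-- counts = {}; for ch in s: counts[ch] = counts.get(ch, 0) + 1
def pvCountsB (s : String) : PySem.Dict Char Int :=
  s.toList.foldl (fun d ch => d.insert ch (d.getD ch 0 + 1)) PySem.Dict.empty

-- count(counts): iterate over the dict's keys; decrement, recurse, restore (threaded
-- functionally: the restored dict is the unmodified d).  fuel = |s| + 1 only makes the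
-- recursion total; one unit is consumed per level and the total count shrinks each level.
mutual
def countB : Nat → PySem.Dict Char Int → Int
  | 0, _ => 0
  | fuel + 1, d => countBLoop fuel d d.keys 0
  termination_by fuel _ => (fuel, 0)

def countBLoop : Nat → PySem.Dict Char Int → List Char → Int → Int
  | _, _, [], total => total
  | fuel, d, ch :: rest, total =>
    if 0 < d.getD ch 0 then
      countBLoop fuel d rest (total + (1 + countB fuel (d.insert ch (d.getD ch 0 - 1))))
    else
      countBLoop fuel d rest total
  termination_by fuel _ ks _ => (fuel, ks.length + 1)
end

def numPossibilities_alt (s : String) : Int :=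
  countB (s.toList.length + 1) (pvCountsB s)

-- ===== PRECONDITION & SPEC =====
def Spec_numPossibilities (s : String) (out : Int) : Prop := out = numPossibilities_alt s
instance (s : String) (out : Int) : Decidable (Spec_numPossibilities s out) := by unfold Spec_numPossibilities; infer_instance

-- ===== CLAIM (what is proved, stated in full; the proofs are below) =====
def Claim_equal_numPossibilities : Prop := ∀ (s : String), Dom_numPossibilities s → Spec_numPossibilities s (numPossibilities s)

-- ===== LEMMAS AND PROOFS =====


def seqs (m : Multiset Char) : Finset (List Char) :=
  m.toFinset.attach.biUnion (fun c => insert [c.1] ((seqs (m.erase c.1)).image (c.1 :: ·)))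
  termination_by m.card
  decreasing_by exact Multiset.card_erase_lt_of_mem (Multiset.mem_toFinset.mp c.2)

lemma cons_le_iff_le_erase {a : Char} {v : Multiset Char} {m : Multiset Char} (ha : a ∈ m) :
    a ::ₘ v ≤ m ↔ v ≤ m.erase a := by
  rw [Multiset.le_iff_count, Multiset.le_iff_count]
  constructor
  · intro h b
    by_cases hb : b = a
    · subst hb
      have := h b
      simp [Multiset.count_cons_self, Multiset.count_erase_self] at *
      omega
    · have := h b
      simp [Multiset.count_cons_of_ne hb, Multiset.count_erase_of_ne hb] at *
      omega
  · intro h b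
    by_cases hb : b = a
    · subst hb
      have := h b
      have hpos : 0 < m.count b := Multiset.count_pos.mpr ha
      simp [Multiset.count_cons_self, Multiset.count_erase_self] at *
      omega
    · have := h b
      simp [Multiset.count_cons_of_ne hb, Multiset.count_erase_of_ne hb] at *
      omega

lemma mem_seqs_aux : ∀ n (m : Multiset Char), m.card ≤ n →
    ∀ x, (x ∈ seqs m ↔ x ≠ [] ∧ (↑x : Multiset Char) ≤ m) := by
  intro n
  induction n with
  | zero =>
    intro m hm x
    have hm0 : m = 0 := Multiset.card_eq_zero.mp (Nat.le_zero.mp hm)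
    subst hm0
    rw [seqs]
    simp only [Multiset.toFinset_zero, Finset.attach_empty, Finset.biUnion_empty,
      Finset.notMem_empty, false_iff]
    rintro ⟨hx, hle⟩
    rcases x with _ | ⟨c, v⟩
    · exact hx rfl
    · have : c ∈ (0 : Multiset Char) := Multiset.subset_of_le hle (by simp)
      simp at this
  | succ n IH =>
    intro m hm x
    rw [seqs]
    simp only [Finset.mem_biUnion, Finset.mem_attach, true_and, Subtype.exists,
      Finset.mem_insert, Finset.mem_image]
    constructor
    · rintro ⟨c, hc, hx | ⟨v, hv, rfl⟩⟩
      · subst hx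
        have hcm : c ∈ m := Multiset.mem_toFinset.mp hc
        exact ⟨by simp, by simpa using Multiset.singleton_le.mpr hcm⟩
      · have hcm : c ∈ m := Multiset.mem_toFinset.mp hc
        have hcard : (m.erase c).card ≤ n := by
          have := Multiset.card_erase_lt_of_mem hcm
          omega
        have hv' := (IH (m.erase c) hcard v).mp hv
        refine ⟨by simp, ?_⟩
        rw [← Multiset.cons_coe]
        exact (cons_le_iff_le_erase hcm).mpr hv'.2
    · rintro ⟨hx, hle⟩
      rcases x with _ | ⟨c, v⟩
      · exact absurd rfl hx
      · rw [← Multiset.cons_coe] at hle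
        have hcm : c ∈ m := Multiset.subset_of_le hle (by simp)
        have hvle : (↑v : Multiset Char) ≤ m.erase c := (cons_le_iff_le_erase hcm).mp hle
        have hcard : (m.erase c).card ≤ n := by
          have := Multiset.card_erase_lt_of_mem hcm
          omega
        refine ⟨c, Multiset.mem_toFinset.mpr hcm, ?_⟩
        rcases v with _ | ⟨b, w⟩
        · exact Or.inl rfl
        · exact Or.inr ⟨b :: w, (IH (m.erase c) hcard (b :: w)).mpr ⟨by simp, hvle⟩, rfl⟩

lemma mem_seqs (m : Multiset Char) (x : List Char) :
    x ∈ seqs m ↔ x ≠ [] ∧ (↑x : Multiset Char) ≤ m :=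
  mem_seqs_aux m.card m le_rfl x

lemma card_seqs (m : Multiset Char) :
    (seqs m).card = ∑ c ∈ m.toFinset, (1 + (seqs (m.erase c)).card) := by
  rw [seqs]
  rw [Finset.card_biUnion]
  · rw [← Finset.sum_attach m.toFinset (fun c => 1 + (seqs (m.erase c)).card)]
    refine Finset.sum_congr rfl ?_
    rintro ⟨c, hc⟩ -
    have h1 : [c] ∉ (seqs (m.erase c)).image (c :: ·) := by
      simp only [Finset.mem_image]
      rintro ⟨v, hv, hveq⟩
      have : v = [] := by simpa using hveq
      subst this
      exact ((mem_seqs _ _).mp hv).1 rfl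
    rw [Finset.card_insert_of_notMem h1,
      Finset.card_image_of_injective _ (fun a b h => by injection h)]
    simp [Nat.add_comm]
  · rintro ⟨c, hc⟩ - ⟨c', hc'⟩ - hne
    simp only [Function.onFun, Finset.disjoint_left]
    intro x hx hx'
    have hcc' : c ≠ c' := fun h => hne (by simpa using h)
    have h1 : x.head? = some c := by
      rcases Finset.mem_insert.mp hx with h | h
      · subst h; rfl
      · rcases Finset.mem_image.mp h with ⟨v, -, rfl⟩; rfl
    have h2 : x.head? = some c' := by
      rcases Finset.mem_insert.mp hx' with h | h
      · subst h; rfl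
      · rcases Finset.mem_image.mp h with ⟨v, -, rfl⟩; rfl
    rw [h1] at h2
    exact hcc' (by injection h2)

def HypA (M : Multiset Char) (k : Nat) (R : Std.HashSet (List Char)) : Prop :=
  ∀ q ∈ R, q ≠ [] ∧ (k < q.length → ∀ u, u ≠ [] →
    (↑q + ↑u : Multiset Char) ≤ M → q ++ u ∈ R)

lemma hypA_mono {M : Multiset Char} {k k' : Nat} {R : Std.HashSet (List Char)}
    (h : k ≤ k') (hH : HypA M k R) : HypA M k' R :=
  fun q hq => ⟨(hH q hq).1, fun hlt u hu hle => (hH q hq).2 (by omega) u hu hle⟩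

lemma coe_string_eq (string : List Char) (i : Nat) (hi : i < string.length) :
    (↑string : Multiset Char) = string.getD i ' ' ::ₘ ↑(string.eraseIdx i) := by
  rw [List.getD_eq_getElem string ' ' hi, Multiset.cons_coe]
  exact (Multiset.coe_eq_coe.mpr (List.getElem_cons_eraseIdx_perm hi)).symm

lemma lemA : ∀ fuel (path string : List Char) (R : Std.HashSet (List Char)) (M : Multiset Char),
    string.length < fuel → (↑path + ↑string : Multiset Char) = M →
    HypA M path.length R →
    (path ∈ R → ∀ u, u ≠ [] → (↑u : Multiset Char) ≤ ↑string → path ++ u ∈ R) →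
    (∀ x, x ∈ dfsA fuel path string R ↔
        x ∈ R ∨ (path ≠ [] ∧ x = path) ∨
        ∃ u, u ≠ [] ∧ (↑u : Multiset Char) ≤ ↑string ∧ x = path ++ u)
    ∧ ∀ k, HypA M k R → HypA M k (dfsA fuel path string R) := by
  intro fuel
  induction fuel with
  | zero => intro path string R M hlen; omega
  | succ fuel IH =>
    intro path string R M hlen hM hHyp hprune
    simp only [dfsA]
    by_cases hmem : path ∈ R
    · rw [if_pos hmem]
      refine ⟨fun x => ⟨fun hx => Or.inl hx, ?_⟩, fun k hk => hk⟩
      rintro (hx | ⟨hp, rfl⟩ | ⟨u, hu, hule, rfl⟩)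
      · exact hx
      · exact hmem
      · exact hprune hmem u hu hule
    · rw [if_neg hmem]
      set R₀ : Std.HashSet (List Char) := if path ≠ [] then R.insert path else R with hR₀
      have hmemR₀ : ∀ x, x ∈ R₀ ↔ x ∈ R ∨ (path ≠ [] ∧ x = path) := by
        intro x
        by_cases hp : path = []
        · simp [hR₀, hp]
        · rw [hR₀, if_pos hp]
          rw [Std.HashSet.mem_insert]
          simp only [beq_iff_eq]
          constructor
          · rintro (rfl | h)
            · exact Or.inr ⟨hp, rfl⟩
            · exact Or.inl h
          · rintro (h | ⟨-, rfl⟩)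
            · exact Or.inr h
            · exact Or.inl rfl
      have hHypR₀ : HypA M path.length R₀ := by
        intro q hq
        rcases (hmemR₀ q).mp hq with hqR | ⟨hp, rfl⟩
        · exact ⟨(hHyp q hqR).1, fun hlt u hu hle =>
            (hmemR₀ _).mpr (Or.inl ((hHyp q hqR).2 hlt u hu hle))⟩
        · exact ⟨hp, fun hlt => absurd hlt (by omega)⟩
      -- loop lemma
      have loop : ∀ (l : List Nat) (S : Std.HashSet (List Char)),
          (∀ j ∈ l, j < string.length) → HypA M path.length S →
          (∀ x, x ∈ l.foldl
              (fun r i => dfsA fuel (path ++ [string.getD i ' ']) (string.take i ++ string.drop (i + 1)) r) S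
            ↔ x ∈ S ∨ ∃ j ∈ l, ∃ u : List Char, (↑u : Multiset Char) ≤ ↑(string.eraseIdx j) ∧
                x = path ++ string.getD j ' ' :: u)
          ∧ HypA M path.length (l.foldl
              (fun r i => dfsA fuel (path ++ [string.getD i ' ']) (string.take i ++ string.drop (i + 1)) r) S) := by
        intro l
        induction l with
        | nil => intro S hjl hS; exact ⟨fun x => by simp, by simpa using hS⟩
        | cons i l' IHl =>
          intro S hjl hS
          have hi : i < string.length := hjl i (List.mem_cons_self ..)
          have hcoe : (↑string : Multiset Char) = string.getD i ' ' ::ₘ ↑(string.eraseIdx i) :=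
            coe_string_eq string i hi
          set c := string.getD i ' ' with hc
          have herase : string.take i ++ string.drop (i + 1) = string.eraseIdx i :=
            (List.eraseIdx_eq_take_drop_succ string i).symm
          have hlen' : (string.eraseIdx i).length < fuel := by
            rw [List.length_eraseIdx_of_lt hi]; omega
          have happ : ∀ u : List Char, (↑(path ++ [c]) : Multiset Char) + ↑u = ↑path + (c ::ₘ ↑u) := by
            intro u
            rw [Multiset.cons_coe, Multiset.coe_add, Multiset.coe_add, List.append_assoc]
            rfl
          have hM' : (↑(path ++ [c]) + ↑(string.eraseIdx i) : Multiset Char) = M := by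
            rw [← hM, hcoe, happ]
          have hHyp' : HypA M (path ++ [c]).length S := by
            refine hypA_mono ?_ hS
            simp
          have hprune' : path ++ [c] ∈ S → ∀ u, u ≠ [] →
              (↑u : Multiset Char) ≤ ↑(string.eraseIdx i) → (path ++ [c]) ++ u ∈ S := by
            intro hin u hu hule
            refine (hS _ hin).2 (by simp) u hu ?_
            rw [← hM, hcoe, happ]
            exact add_le_add le_rfl (Multiset.cons_le_cons c hule)
          have hchild := IH (path ++ [c]) (string.eraseIdx i) S M hlen' hM' hHyp' hprune'
          simp only [List.foldl_cons]
          rw [herase]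
          set S' := dfsA fuel (path ++ [c]) (string.eraseIdx i) S with hS'
          have hS'Hyp : HypA M path.length S' := hchild.2 path.length hS
          have hrest := IHl S' (fun j hj => hjl j (List.mem_cons_of_mem _ hj)) hS'Hyp
          refine ⟨?_, hrest.2⟩
          intro x
          rw [(hrest.1 x)]
          have hS'mem : x ∈ S' ↔ x ∈ S ∨ ∃ u : List Char, (↑u : Multiset Char) ≤ ↑(string.eraseIdx i) ∧
              x = path ++ c :: u := by
            rw [hchild.1 x]
            constructor
            · rintro (h | ⟨-, rfl⟩ | ⟨u, hu, hule, rfl⟩)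
              · exact Or.inl h
              · exact Or.inr ⟨[], by simp⟩
              · exact Or.inr ⟨u, hule, by simp⟩
            · rintro (h | ⟨u, hule, rfl⟩)
              · exact Or.inl h
              · rcases u with - | ⟨b, v⟩
                · exact Or.inr (Or.inl ⟨by simp, by simp⟩)
                · exact Or.inr (Or.inr ⟨b :: v, by simp, by simpa using hule, by simp⟩)
          rw [hS'mem]
          constructor
          · rintro ((h | ⟨u, hule, rfl⟩) | ⟨j, hj, u, hule, rfl⟩)
            · exact Or.inl h
            · exact Or.inr ⟨i, List.mem_cons_self .., u, hule, rfl⟩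
            · exact Or.inr ⟨j, List.mem_cons_of_mem _ hj, u, hule, rfl⟩
          · rintro (h | ⟨j, hj, u, hule, rfl⟩)
            · exact Or.inl (Or.inl h)
            · rcases List.mem_cons.mp hj with rfl | hj'
              · exact Or.inl (Or.inr ⟨u, hule, rfl⟩)
              · exact Or.inr ⟨j, hj', u, hule, rfl⟩
      have hloop := loop (List.range string.length) R₀ (fun j hj => List.mem_range.mp hj) hHypR₀
      constructor
      · intro x
        rw [hloop.1 x, hmemR₀ x]
        constructor
        · rintro ((h | h) | ⟨j, hj, u, hule, rfl⟩)
          · exact Or.inl h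
          · exact Or.inr (Or.inl h)
          · have hjlt : j < string.length := List.mem_range.mp hj
            refine Or.inr (Or.inr ⟨string.getD j ' ' :: u, by simp, ?_, rfl⟩)
            rw [coe_string_eq string j hjlt, ← Multiset.cons_coe]
            exact Multiset.cons_le_cons _ hule
        · rintro (h | h | ⟨u, hu, hule, rfl⟩)
          · exact Or.inl (Or.inl h)
          · exact Or.inl (Or.inr h)
          · rcases u with - | ⟨b, v⟩
            · exact absurd rfl hu
            · have hb : b ∈ string := by
                have : b ∈ (↑string : Multiset Char) :=
                  Multiset.mem_of_le hule (by rw [← Multiset.cons_coe]; exact Multiset.mem_cons_self ..)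
                simpa using this
              obtain ⟨j, hjlt, hjb⟩ := List.mem_iff_getElem.mp hb
              have hgd : string.getD j ' ' = b := by rw [List.getD_eq_getElem string ' ' hjlt, hjb]
              refine Or.inr ⟨j, List.mem_range.mpr hjlt, v, ?_, by rw [hgd]⟩
              have := hule
              rw [← Multiset.cons_coe, coe_string_eq string j hjlt, hgd] at this
              exact (Multiset.cons_le_cons_iff b).mp this
      · intro k hk qq hq
        rcases (hloop.1 qq).mp hq with hq0 | ⟨j, hj, u, hule, rfl⟩
        · rcases (hmemR₀ qq).mp hq0 with hqR | ⟨hp, rfl⟩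
          · refine ⟨(hk qq hqR).1, fun hlt u hu hle => ?_⟩
            exact (hloop.1 _).mpr (Or.inl ((hmemR₀ _).mpr (Or.inl ((hk qq hqR).2 hlt u hu hle))))
          · refine ⟨hp, fun hlt u hu hle => ?_⟩
            have hule : (↑u : Multiset Char) ≤ ↑string := by
              rw [← hM] at hle
              exact le_of_add_le_add_left hle
            rcases u with - | ⟨b, v⟩
            · exact absurd rfl hu
            · have hb : b ∈ string := by
                have : b ∈ (↑string : Multiset Char) :=
                  Multiset.mem_of_le hule (by rw [← Multiset.cons_coe]; exact Multiset.mem_cons_self ..)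
                simpa using this
              obtain ⟨j, hjlt, hjb⟩ := List.mem_iff_getElem.mp hb
              have hgd : string.getD j ' ' = b := by rw [List.getD_eq_getElem string ' ' hjlt, hjb]
              refine (hloop.1 _).mpr (Or.inr ⟨j, List.mem_range.mpr hjlt, v, ?_, by rw [hgd]⟩)
              have := hule
              rw [← Multiset.cons_coe, coe_string_eq string j hjlt, hgd] at this
              exact (Multiset.cons_le_cons_iff b).mp this
        · have hjlt : j < string.length := List.mem_range.mp hj
          have hcj : (↑(string.getD j ' ' :: u) : Multiset Char) ≤ ↑string := by
            rw [coe_string_eq string j hjlt, ← Multiset.cons_coe]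
            exact Multiset.cons_le_cons _ hule
          refine ⟨by simp, fun hlt w hw hle => ?_⟩
          have hle2 : (↑(u ++ w) : Multiset Char) ≤ ↑(string.eraseIdx j) := by
            rw [← hM] at hle
            have h1 : (↑(path ++ string.getD j ' ' :: u) : Multiset Char) + ↑w
                = ↑path + (string.getD j ' ' ::ₘ ↑(u ++ w)) := by
              simp [← Multiset.coe_add, ← Multiset.cons_coe, add_assoc]
            rw [h1, coe_string_eq string j hjlt] at hle
            exact (Multiset.cons_le_cons_iff _).mp (le_of_add_le_add_left hle)
          refine (hloop.1 _).mpr (Or.inr ⟨j, hj, u ++ w, hle2, by simp⟩)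

lemma countB_spec : ∀ fuel (m : Multiset Char) (d : PySem.Dict Char Int),
    m.card < fuel → d.keys.Nodup → (∀ c, d.getD c 0 = (m.count c : Int)) →
    countB fuel d = ((seqs m).card : Int) := by
  intro fuel
  induction fuel with
  | zero => intro m d hcard; omega
  | succ fuel IH =>
    intro m d hcard hnd hgetD
    have hpos_mem : ∀ c : Char, 0 < d.getD c 0 → c ∈ m := by
      intro c hc
      rw [hgetD c] at hc
      exact Multiset.count_pos.mp (by exact_mod_cast hc)
    have hchild : ∀ ch : Char, 0 < d.getD ch 0 →
        countB fuel (d.insert ch (d.getD ch 0 - 1)) = ((seqs (m.erase ch)).card : Int) := by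
      intro ch hch
      have hchm : ch ∈ m := hpos_mem ch hch
      have hcontains : d.contains ch = true := by
        by_contra h
        have : d.contains ch = false := by
          cases hcc : d.contains ch
          · rfl
          · exact absurd hcc h
        rw [PySem.Dict.getD_of_not_contains d 0 this] at hch
        omega
      refine IH (m.erase ch) _ ?_ ?_ ?_
      · rw [Multiset.card_erase_of_mem hchm, Nat.pred_eq_sub_one]
        have h1 : 0 < m.card := Multiset.card_pos_iff_exists_mem.mpr ⟨ch, hchm⟩
        omega
      · rw [PySem.Dict.keys_insert_of_contains d _ hcontains]
        exact hnd
      · intro c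
        rw [PySem.Dict.getD_insert]
        by_cases hc : c = ch
        · subst hc
          rw [if_pos rfl, hgetD c, Multiset.count_erase_self]
          have : 0 < m.count c := Multiset.count_pos.mpr hchm
          omega
        · rw [if_neg hc, hgetD c, Multiset.count_erase_of_ne hc]
    have loopB : ∀ (ks : List Char) (total : Int), countBLoop fuel d ks total
        = total + ((ks.filter (fun c => decide ((0:Int) < d.getD c 0))).map
            (fun c => 1 + ((seqs (m.erase c)).card : Int))).sum := by
      intro ks
      induction ks with
      | nil => intro total; simp [countBLoop]
      | cons ch rest IHk =>
        intro total
        simp only [countBLoop]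
        by_cases h : (0:Int) < d.getD ch 0
        · rw [if_pos h, IHk, hchild ch h]
          simp only [List.filter_cons, decide_eq_true_eq, h, if_pos, List.map_cons, List.sum_cons]
          ring
        · rw [if_neg h, IHk]
          simp only [List.filter_cons]
          simp [h]
    simp only [countB]
    rw [loopB, zero_add]
    set l := d.keys.filter (fun c => decide ((0:Int) < d.getD c 0)) with hl
    have hlnd : l.Nodup := hnd.filter _
    have hlmem : ∀ c, c ∈ l ↔ c ∈ m.toFinset := by
      intro c
      rw [hl, List.mem_filter, Multiset.mem_toFinset]
      constructor
      · rintro ⟨-, hc⟩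
        exact hpos_mem c (by simpa using hc)
      · intro hc
        have hcount : 0 < m.count c := Multiset.count_pos.mpr hc
        have hgd : 0 < d.getD c 0 := by rw [hgetD c]; exact_mod_cast hcount
        refine ⟨?_, by simpa using hgd⟩
        by_contra h
        have : d.contains c = false := by
          cases hcc : d.contains c
          · rfl
          · exact absurd ((PySem.Dict.contains_iff_mem_keys d c).mp hcc) h
        rw [PySem.Dict.getD_of_not_contains d 0 this] at hgd
        omega
    have hltf : l.toFinset = m.toFinset := Finset.ext fun c => by
      rw [List.mem_toFinset, hlmem]
    rw [← List.sum_toFinset _ hlnd, hltf]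
    rw [card_seqs m]
    push_cast
    rfl


-- ===== VERDICT (by name: the statement is the Claim_ definition above) =====
theorem numPossibilities_spec : Claim_equal_numPossibilities := by
  intro s _
  unfold Spec_numPossibilities numPossibilities numPossibilities_alt
  set ml := s.toList with hml
  set M : Multiset Char := (↑ml : Multiset Char) with hM
  have hHyp0 : HypA M 0 (∅ : Std.HashSet (List Char)) := by
    intro q hq
    exact absurd hq (Std.HashSet.not_mem_empty)
  have hA := lemA (ml.length + 1) [] ml ∅ M (by omega) (by rw [hM]; simp) hHyp0
    (by intro h; exact absurd h (Std.HashSet.not_mem_empty))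
  set R := dfsA (ml.length + 1) [] ml (∅ : Std.HashSet (List Char)) with hR
  have hmemR : ∀ x, x ∈ R ↔ x ∈ seqs M := by
    intro x
    rw [mem_seqs, hA.1 x]
    constructor
    · rintro (h | ⟨h, -⟩ | ⟨u, hu, hule, rfl⟩)
      · exact absurd h (Std.HashSet.not_mem_empty)
      · exact absurd rfl h
      · exact ⟨hu, hule⟩
    · rintro ⟨hx, hle⟩
      exact Or.inr (Or.inr ⟨x, hx, hle, rfl⟩)
  have hnodup : R.toList.Nodup := by
    have := Std.HashSet.distinct_toList (m := R)
    simpa [List.Nodup] using this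
  have hAcount : ((R.size : Nat) : Int) = ((seqs M).card : Int) := by
    have h1 : R.toList.toFinset = seqs M := Finset.ext fun x => by
      rw [List.mem_toFinset, Std.HashSet.mem_toList, hmemR]
    have h2 : R.toList.length = (seqs M).card := by
      rw [← h1, List.toFinset_card_of_nodup hnodup]
    rw [← Std.HashSet.length_toList, h2]
  have hcounter : pvCountsB s = PySem.Dict.counter ml :=
    PySem.Dict.foldl_insert_getD_add_one_eq_counter ml
  have hB : countB (ml.length + 1) (pvCountsB s) = ((seqs M).card : Int) := by
    refine countB_spec (ml.length + 1) M (pvCountsB s) ?_ ?_ ?_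
    · rw [hM, Multiset.coe_card]
      omega
    · rw [hcounter]
      exact PySem.Dict.nodup_keys_counter ml
    · intro c
      rw [hcounter, PySem.Dict.getD_counter, hM, Multiset.coe_count]
  rw [hAcount, hB]
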